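-- pv_equiv track=rewrite | github.com/dylan-okeefe/hestia | src/hestia/platforms/allowlist.py | match_allowlist
-- ===== SOURCE A (Python) =====
-- import fnmatch
--
-- def match_allowlist(
--     patterns: list[str],
--     value: str,
--     case_sensitive: bool = True,
-- ) -> bool:
--     """Check if ``value`` matches any pattern in ``patterns``.
--
--     Patterns use Unix shell-style wildcards:
--     - ``*`` matches everything
--     - ``?`` matches any single character
--     - ``[seq]`` matches any character in seq
--
--     An empty pattern list denies all (secure default).
--
--     Args:
--         patterns: List of allow-list patterns
--         value: The value to match (e.g. user ID, room ID)
--         case_sensitive: Whether matching is case-sensitive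
--
--     Returns:
--         True if the value matches at least one pattern
--     """
--     if not patterns:
--         return False
--
--     for pattern in patterns:
--         if case_sensitive:
--             if fnmatch.fnmatchcase(value, pattern):
--                 return True
--         else:
--             if fnmatch.fnmatch(value.lower(), pattern.lower()):
--                 return True
--
--     return False
-- ===== SOURCE B (Python) =====
-- # B: parse each pattern once into wildcard tokens with a simple left-to-right
-- # grammar, then decide the match with a dynamic-programming table over the
-- # value's suffixes (dp[j] = "value[j:] matches the remaining pattern"),
-- # instead of translating to a regular expression and searching.
--
-- STAR = ('star',)
-- ANY = ('any',)
--
--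
-- def _parse_class(pat, i):
--     """pat[i:] is just past '['; return (negated, items, next_index), or None
--     if the class is unterminated.  Items are ('char', c) or ('range', lo, hi);
--     a range with lo > hi simply matches nothing."""
--     n = len(pat)
--     j = i
--     neg = j < n and pat[j] == '!'
--     if neg:
--         j += 1
--     k = j
--     if k < n and pat[k] == ']':      # a ']' first in the class is literal
--         k += 1
--     while k < n and pat[k] != ']':
--         k += 1
--     if k >= n:
--         return None
--     body = pat[j:k]
--     items = []
--     m = 0
--     while m < len(body):
--         if body[m + 1:m + 2] == '-' and m + 2 < len(body):
--             items.append(('range', body[m], body[m + 2]))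
--             m += 3
--         else:
--             items.append(('char', body[m]))
--             m += 1
--     return neg, items, k + 1
--
--
-- def _tokenize(pat):
--     toks = []
--     i = 0
--     while i < len(pat):
--         c = pat[i]
--         i += 1
--         if c == '*':
--             toks.append(STAR)
--         elif c == '?':
--             toks.append(ANY)
--         elif c == '[':
--             cls = _parse_class(pat, i)
--             if cls is None:
--                 toks.append(('char', '['))
--             else:
--                 neg, items, i = cls
--                 toks.append(('class', neg, items))
--         else:
--             toks.append(('char', c))
--     return toks
--
--
-- def _tok_ok(tok, c):
--     if tok[0] == 'char':
--         return c == tok[1]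
--     if tok[0] == 'any':
--         return True
--     _, neg, items = tok
--     hit = any(c == it[1] if it[0] == 'char' else it[1] <= c <= it[2]
--               for it in items)
--     return hit != neg
--
--
-- def _match(toks, s):
--     # dp[j] = "s[j:] matches the part of the pattern processed so far"
--     dp = [False] * len(s) + [True]
--     for tok in reversed(toks):
--         if tok == STAR:
--             acc = False
--             ndp = [False] * (len(s) + 1)
--             for j in range(len(s), -1, -1):
--                 acc = acc or dp[j]
--                 ndp[j] = acc
--             dp = ndp
--         else:
--             dp = [_tok_ok(tok, s[j]) and dp[j + 1]
--                   for j in range(len(s))] + [False]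
--     return dp[0]
--
--
-- def match_allowlist(patterns, value, case_sensitive=True):
--     if not case_sensitive:
--         value = value.lower()
--         patterns = [p.lower() for p in patterns]
--     return any(_match(_tokenize(p), value) for p in patterns)
-- ===== Notes on version B (the rewrite author's own statement) =====
-- stated objective: alternative
-- what changed: B parses each pattern once with a plain left-to-right wildcard grammar (literal / '?' / '*' / character class with simple x-y ranges) and decides the match with a dynamic-programming table over the value's suffixes, instead of A's fnmatch translation to a regular expression plus backtracking regex search; …
-- outside the precondition, e.g. on match_allowlist(['[a--!]'], 'a', True): A returns True, B returns False
import Mathlib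
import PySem

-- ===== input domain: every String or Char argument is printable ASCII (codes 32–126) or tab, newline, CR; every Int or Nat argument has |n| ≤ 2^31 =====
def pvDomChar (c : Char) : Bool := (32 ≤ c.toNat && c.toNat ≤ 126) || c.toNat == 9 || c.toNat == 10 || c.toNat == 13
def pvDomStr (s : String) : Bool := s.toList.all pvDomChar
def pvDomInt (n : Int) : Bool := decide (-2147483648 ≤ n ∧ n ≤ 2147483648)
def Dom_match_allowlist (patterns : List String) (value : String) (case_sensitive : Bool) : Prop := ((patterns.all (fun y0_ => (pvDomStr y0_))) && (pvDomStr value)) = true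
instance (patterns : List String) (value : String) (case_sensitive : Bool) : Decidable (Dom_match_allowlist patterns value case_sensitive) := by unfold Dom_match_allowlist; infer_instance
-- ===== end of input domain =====

-- B parses each pattern once with a plain left-to-right wildcard grammar and
-- decides the match with a dynamic-programming table over the value's suffixes,
-- instead of A's fnmatch translation to a regular expression plus backtracking
-- regex search (objective: alternative; no speed claim).

-- ===== PORT A =====
-- The token alphabet fnmatch.translate compiles a pattern into; the functions
-- below are a step-for-step hand port of fnmatch.translate's parsing (exact on
-- the ASCII domain) followed by re.match's backtracking search.
inductive GlobItem where
  | lit : Char → GlobItem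
  | rng : Char → Char → GlobItem
deriving DecidableEq, Repr

inductive GlobTok where
  | lit : Char → GlobTok
  | any : GlobTok
  | star : GlobTok
  | set : Bool → List GlobItem → GlobTok
deriving DecidableEq, Repr

-- scan forward to the closing ']' (fnmatch's `while j < n and pat[j] != ']'`)
def scanClose : List Char → Option (List Char × List Char)
  | [] => none
  | c :: r => if c = ']' then some ([], r) else (scanClose r).map (fun p => (c :: p.1, p.2))

theorem scanClose_shrink : ∀ (l a r : List Char), scanClose l = some (a, r) → r.length < l.length := by
  intro l
  induction l with
  | nil => intro a r h; simp [scanClose] at h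
  | cons c t ih =>
    intro a r h
    by_cases hc : c = ']'
    · simp [scanClose, hc] at h
      simp [← h.2]
    · simp [scanClose, hc] at h
      obtain ⟨p, hp, hape⟩ := h
      have := ih _ _ hp
      simp only [List.length_cons]
      omega

-- `j = i; if pat[j]=='!': j+=1; if pat[j]==']': j+=1; while …` of fnmatch.translate
def bracketPre (l : List Char) : List Char × List Char :=
  match l with
  | '!' :: ']' :: r => (['!', ']'], r)
  | '!' :: r => (['!'], r)
  | ']' :: r => ([']'], r)
  | r => ([], r)

theorem bracketPre_snd_le (l : List Char) : (bracketPre l).2.length ≤ l.length := by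
  unfold bracketPre
  rcases l with _ | ⟨c, _ | ⟨d, t⟩⟩ <;> split <;> simp_all <;> omega

def bracketSpan (l : List Char) : Option (List Char × List Char) :=
  (scanClose (bracketPre l).2).map (fun p => ((bracketPre l).1 ++ p.1, p.2))

theorem bracketSpan_shrink : ∀ (l a r : List Char), bracketSpan l = some (a, r) → r.length < l.length := by
  intro l a r h
  unfold bracketSpan at h
  simp only [Option.map_eq_some_iff] at h
  obtain ⟨p, hp, he⟩ := h
  injection he with h1 h2
  subst h2
  have hs := scanClose_shrink _ _ _ hp
  have := bracketPre_snd_le l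
  omega

-- find '-' at offset ≥ off (pat.find('-', k, j))
def findDash (l : List Char) (off : Nat) : Option Nat :=
  ((l.drop off).findIdx? (fun c => c = '-')).map (· + off)

theorem findDash_lt_length (l : List Char) (off k : Nat) (h : findDash l off = some k) : k < l.length := by
  unfold findDash at h
  simp only [Option.map_eq_some_iff] at h
  obtain ⟨j, hj, hk⟩ := h
  have := List.findIdx?_eq_some_iff_findIdx_eq.mp hj
  have hlt : j < (l.drop off).length := this.1
  simp only [List.length_drop] at hlt
  omega

-- the chunk-splitting loop of fnmatch.translate's '[...]-with-"-"' branch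
def chunksLoop (rem : List Char) (off : Nat) : List (List Char) :=
  match hfd : findDash rem off with
  | none => if rem = [] then [] else [rem]
  | some k =>
      let rest := chunksLoop (rem.drop (k + 1)) 2
      if rest = [] then [rem.take k ++ ['-']] else rem.take k :: rest
termination_by rem.length
decreasing_by
  have := findDash_lt_length rem off k hfd
  simp only [List.length_drop]
  omega

def chunksOf (stuff : List Char) : List (List Char) :=
  chunksLoop stuff (if stuff.headD ' ' = '!' then 2 else 1)

-- `for k in range(len(chunks)-1, 0, -1): …` empty-range removal, right to left
def mergeChunks : List (List Char) → List (List Char)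
  | [] => []
  | [c] => [c]
  | c1 :: c2 :: rest =>
      match mergeChunks (c2 :: rest) with
      | d :: r' => if d.headD 'a' < c1.getLastD 'a' then (c1.dropLast ++ d.drop 1) :: r' else c1 :: d :: r'
      | [] => [c1]

-- regex character-class semantics of '-'.join(chunks) with each chunk escaped:
-- the joining hyphens form ranges (or a literal '-' when the left chunk is spent)
def itemsOf (consumed : Bool) : List (List Char) → List GlobItem
  | [] => []
  | [ch] => ((if consumed then ch.drop 1 else ch)).map GlobItem.lit
  | ch :: next :: rest =>
      let body := if consumed then ch.drop 1 else ch
      if body = [] then GlobItem.lit '-' :: itemsOf false (next :: rest)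
      else (body.dropLast.map GlobItem.lit)
           ++ [GlobItem.rng (body.getLastD 'a') (next.headD 'a')]
           ++ itemsOf true (next :: rest)

def setToken (stuff : List Char) : GlobTok :=
  if ¬ stuff.contains '-' then
    let neg := stuff.headD ' ' = '!'
    let body := if neg then stuff.drop 1 else stuff
    if body = [] then GlobTok.set true [] else GlobTok.set neg (body.map GlobItem.lit)
  else
    let chunks := mergeChunks (chunksOf stuff)
    if chunks = [[]] then GlobTok.set false []          -- '(?!)': never matches
    else if chunks = [['!']] then GlobTok.set true []    -- '.': any character
    else
      let neg := (chunks.headD []).headD ' ' = '!'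
      let chunks' := if neg then (chunks.headD []).drop 1 :: chunks.drop 1 else chunks
      GlobTok.set neg (itemsOf false chunks')

def tokLoop (acc : List GlobTok) : List Char → List GlobTok
  | [] => acc.reverse
  | '*' :: r =>
      tokLoop (match acc with | GlobTok.star :: _ => acc | _ => GlobTok.star :: acc) r
  | '?' :: r => tokLoop (GlobTok.any :: acc) r
  | '[' :: r =>
      match hbs : bracketSpan r with
      | none => tokLoop (GlobTok.lit '[' :: acc) r
      | some (stuff, rest) => tokLoop (setToken stuff :: acc) rest
  | c :: r => tokLoop (GlobTok.lit c :: acc) r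
termination_by l => l.length
decreasing_by
  all_goals simp only [List.length_cons]
  · omega
  · omega
  · omega
  · have := bracketSpan_shrink _ _ _ hbs; omega
  · omega

def fnTokenize (pat : List Char) : List GlobTok := tokLoop [] pat

def itemMatch (c : Char) : GlobItem → Bool
  | GlobItem.lit x => c = x
  | GlobItem.rng lo hi => decide (lo ≤ c) && decide (c ≤ hi)

def tokMatch : GlobTok → Char → Bool
  | GlobTok.lit x, c => c = x
  | GlobTok.any, _ => true
  | GlobTok.star, _ => false
  | GlobTok.set neg items, c => (items.any (itemMatch c)) != neg

-- regex matching of the translated pattern: backtracking search (A's re.match)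
def rmatch : List GlobTok → List Char → Bool
  | [], s => s.isEmpty
  | GlobTok.star :: p, s =>
      rmatch p s || (match s with | [] => false | _ :: s' => rmatch (GlobTok.star :: p) s')
  | _ :: _, [] => false
  | t :: p, c :: s => tokMatch t c && rmatch p s
termination_by p s => (s.length, p.length)

-- fnmatch.fnmatchcase (on POSIX fnmatch.fnmatch = fnmatchcase after normcase = id)
def fnmatchcaseL (value pattern : String) : Bool :=
  rmatch (fnTokenize pattern.toList) value.toList

def loopA : List String → String → Bool → Bool
  | [], _, _ => false
  | p :: ps, v, cs =>
      if (if cs then fnmatchcaseL v p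
          else fnmatchcaseL (PySem.Str.lower v) (PySem.Str.lower p)) then true
      else loopA ps v cs

def match_allowlist (patterns : List String) (value : String) (case_sensitive : Bool) : Bool :=
  if patterns = [] then false
  else loopA patterns value case_sensitive

-- ===== PORT B =====
-- Source B: a token is a literal character, '?', '*', or a character class made of
-- single characters and simple lo-hi ranges, parsed left to right.
inductive BItem where
  | chr : Char → BItem
  | rng : Char → Char → BItem
deriving DecidableEq, Repr

inductive BTok where
  | chr : Char → BTok
  | any : BTok
  | star : BTok
  | cls : Bool → List BItem → BTok
deriving DecidableEq, Repr

-- `while k < n and pat[k] != ']': k += 1` of _parse_class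
def bfindClose : List Char → Option (List Char × List Char)
  | [] => none
  | c :: r => if c = ']' then some ([], r) else (bfindClose r).map (fun p => (c :: p.1, p.2))

theorem bfindClose_shrink : ∀ (l a r : List Char), bfindClose l = some (a, r) → r.length < l.length := by
  intro l
  induction l with
  | nil => intro a r h; simp [bfindClose] at h
  | cons c t ih =>
    intro a r h
    by_cases hc : c = ']'
    · simp [bfindClose, hc] at h
      simp [← h.2]
    · simp [bfindClose, hc] at h
      obtain ⟨p, hp, hape⟩ := h
      have := ih _ _ hp
      simp only [List.length_cons]
      omega

-- `if pat[k] == ']': k += 1` — a ']' first in the class body is literal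
def bscanBody : List Char → Option (List Char × List Char)
  | ']' :: r => (bfindClose r).map (fun p => (']' :: p.1, p.2))
  | r => bfindClose r

theorem bscanBody_shrink : ∀ (l a r : List Char), bscanBody l = some (a, r) → r.length < l.length := by
  intro l a r h
  unfold bscanBody at h
  split at h
  · simp only [Option.map_eq_some_iff] at h
    obtain ⟨p, hp, he⟩ := h
    injection he with h1 h2
    subst h2
    have := bfindClose_shrink _ _ _ hp
    simp only [List.length_cons]
    omega
  · exact bfindClose_shrink _ _ _ h

-- `neg = pat[j] == '!'` then the body scan
def bsplit : List Char → Option (Bool × List Char × List Char)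
  | '!' :: r => (bscanBody r).map (fun p => (true, p.1, p.2))
  | r => (bscanBody r).map (fun p => (false, p.1, p.2))

theorem bsplit_shrink : ∀ (l : List Char) (neg : Bool) (a r : List Char),
    bsplit l = some (neg, a, r) → r.length < l.length := by
  intro l neg a r h
  unfold bsplit at h
  split at h
  · simp only [Option.map_eq_some_iff] at h
    obtain ⟨p, hp, he⟩ := h
    injection he with h1 h2
    injection h2 with h2 h3
    subst h3
    have := bscanBody_shrink _ _ _ hp
    simp only [List.length_cons]
    omega
  · simp only [Option.map_eq_some_iff] at h
    obtain ⟨p, hp, he⟩ := h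
    injection he with h1 h2
    injection h2 with h2 h3
    subst h3
    exact bscanBody_shrink _ _ _ hp

-- the item scan of _parse_class: x-y makes a range when y is not last-missing
def bitems : List Char → List BItem
  | a :: '-' :: b :: rest => BItem.rng a b :: bitems rest
  | a :: rest => BItem.chr a :: bitems rest
  | [] => []

def btokenize : List Char → List BTok
  | [] => []
  | '*' :: r => BTok.star :: btokenize r
  | '?' :: r => BTok.any :: btokenize r
  | '[' :: r =>
      match hbs : bsplit r with
      | none => BTok.chr '[' :: btokenize r
      | some (neg, body, rest) => BTok.cls neg (bitems body) :: btokenize rest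
  | c :: r => BTok.chr c :: btokenize r
termination_by l => l.length
decreasing_by
  all_goals simp only [List.length_cons]
  · omega
  · omega
  · omega
  · have := bsplit_shrink _ _ _ _ hbs; omega
  · omega

def bitemMatch (c : Char) : BItem → Bool
  | BItem.chr x => c = x
  | BItem.rng lo hi => decide (lo ≤ c) && decide (c ≤ hi)

def btokMatch : BTok → Char → Bool
  | BTok.chr x, c => c = x
  | BTok.any, _ => true
  | BTok.star, _ => false
  | BTok.cls neg items, c => (items.any (bitemMatch c)) != neg

-- the backwards `acc = acc or dp[j]` loop of _match's star case
def bsuffixOr (dp : List Bool) : List Bool :=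
  (dp.foldr (fun b p => (b || p.1, (b || p.1) :: p.2)) ((false : Bool), ([] : List Bool))).2

-- one DP step per token: dp[j] = "s[j:] matches the pattern suffix so far"
def bstep (s : List Char) (t : BTok) (dp : List Bool) : List Bool :=
  if t = BTok.star then bsuffixOr dp
  else ((s.zip dp.tail).map (fun cd => btokMatch t cd.1 && cd.2)) ++ [false]

def bmatch (toks : List BTok) (s : List Char) : Bool :=
  (toks.foldr (fun t dp => bstep s t dp) (List.replicate s.length false ++ [true])).headD false

def match_allowlist_alt (patterns : List String) (value : String) (case_sensitive : Bool) : Bool :=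
  let v := if case_sensitive then value else PySem.Str.lower value
  let pats := if case_sensitive then patterns else patterns.map PySem.Str.lower
  pats.any (fun p => bmatch (btokenize p.toList) v.toList)

-- ===== PRECONDITION & SPEC =====
-- a class body is regular when no three consecutive characters x, '-', y of it
-- have x > y (no reversed range, read conservatively at every window; a purely
-- syntactic shape condition on the pattern text — it runs no matcher)
def okBody (body : List Char) : Bool :=
  (body.zip ((body.drop 1).zip (body.drop 2))).all
    (fun t => !(t.2.1 == '-') || decide (t.1 ≤ t.2.2))

-- check one suffix: if it opens a character class that closes (first ']' after
-- an optional leading '!' and an optional literal first ']'), its body is regular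
def classOk : List Char → Bool
  | '[' :: r =>
      let r1 := if r.headD ' ' = '!' then r.tail else r
      let r2 := if r1.headD ' ' = ']' then r1.tail else r1
      if r2.contains ']' then
        okBody ((if r1.headD ' ' = ']' then [']'] else []) ++ r2.takeWhile (fun c => !(c == ']')))
      else true
  | _ => true

-- Pre_ excludes patterns in which a '['-opened, ']'-closed character class
-- contains a reversed range like [b-a] (POSIX leaves such classes undefined;
-- fnmatch's empty-range chunk merging there yields accidental classes, while B
-- treats the range as empty); the condition is checked on every suffix that
-- starts with '[', a conservative closed-form reading, and on the lowered
-- patterns for case-insensitive calls, exactly the ones A hands to fnmatch.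
def Pre_match_allowlist (patterns : List String) (value : String) (case_sensitive : Bool) : Prop :=
  ((if case_sensitive then patterns else patterns.map PySem.Str.lower).all
    (fun p => p.toList.tails.all classOk)) = true
instance (patterns : List String) (value : String) (case_sensitive : Bool) : Decidable (Pre_match_allowlist patterns value case_sensitive) := by unfold Pre_match_allowlist; infer_instance

def pvWitness_match_allowlist : List String × String × Bool := (["a*", "[0-9]?"], "abc", true)

def Spec_match_allowlist (patterns : List String) (value : String) (case_sensitive : Bool) (out : Bool) : Prop := out = match_allowlist_alt patterns value case_sensitive
instance (patterns : List String) (value : String) (case_sensitive : Bool) (out : Bool) : Decidable (Spec_match_allowlist patterns value case_sensitive out) := by unfold Spec_match_allowlist; infer_instance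

-- ===== CLAIM (what is proved, stated in full; the proofs are below) =====
def Claim_equal_match_allowlist : Prop := ∀ (patterns : List String) (value : String) (case_sensitive : Bool), Dom_match_allowlist patterns value case_sensitive → Pre_match_allowlist patterns value case_sensitive → Spec_match_allowlist patterns value case_sensitive (match_allowlist patterns value case_sensitive)

-- ===== LEMMAS AND PROOFS =====


-- ---------- Part 1: B's DP table computes a backtracking matcher on B tokens ----------

def brmatch : List BTok → List Char → Bool
  | [], s => s.isEmpty
  | BTok.star :: p, s =>
      brmatch p s || (match s with | [] => false | _ :: s' => brmatch (BTok.star :: p) s')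
  | _ :: _, [] => false
  | t :: p, c :: s => btokMatch t c && brmatch p s
termination_by p s => (s.length, p.length)

theorem isEmpty_tails (s : List Char) :
    (List.tails s).map (fun u => List.isEmpty u) = List.replicate s.length false ++ [true] := by
  induction s <;> simp_all [List.tails_cons, List.replicate_succ]

theorem bdp_init (s : List Char) :
    (List.tails s).map (fun u => brmatch [] u) = List.replicate s.length false ++ [true] := by
  simp only [brmatch]
  exact isEmpty_tails s

theorem bsuffixOr_nil : bsuffixOr [] = [] := rfl

theorem bsuffixOr_cons (b : Bool) (l : List Bool) :
    bsuffixOr (b :: l) = (b || (bsuffixOr l).headD false) :: bsuffixOr l := by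
  have h : (l.foldr (fun b p => (b || p.1, (b || p.1) :: p.2)) ((false : Bool), ([] : List Bool))).1
      = (l.foldr (fun b p => (b || p.1, (b || p.1) :: p.2)) ((false : Bool), ([] : List Bool))).2.headD false := by
    cases l with
    | nil => rfl
    | cons c t => simp
  simp [bsuffixOr, h]

theorem map_tails_headD (f : List Char → Bool) (s : List Char) :
    (((List.tails s).map f).headD false) = f s := by
  cases s <;> simp [List.tails_cons]

theorem bdp_star (s : List Char) (tks : List BTok) :
    bsuffixOr ((List.tails s).map (fun u => brmatch tks u))
      = (List.tails s).map (fun u => brmatch (BTok.star :: tks) u) := by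
  induction s with
  | nil => simp [bsuffixOr_cons, bsuffixOr_nil, brmatch]
  | cons c s' ih =>
      simp only [List.tails_cons, List.map_cons, bsuffixOr_cons, ih, map_tails_headD]
      congr 1
      rw [show brmatch (BTok.star :: tks) (c :: s')
            = (brmatch tks (c :: s') || brmatch (BTok.star :: tks) s') from by
        conv_lhs => rw [brmatch]]

theorem brmatch_nil_nonstar (tks : List BTok) (t : BTok) (ht : t ≠ BTok.star) :
    brmatch (t :: tks) [] = false := by
  cases t <;> simp [brmatch] at *

theorem brmatch_cons_nonstar (tks : List BTok) (t : BTok) (ht : t ≠ BTok.star)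
    (c : Char) (s : List Char) :
    brmatch (t :: tks) (c :: s) = (btokMatch t c && brmatch tks s) := by
  cases t <;> simp [brmatch] at *

theorem bdp_nonstar (s : List Char) (tks : List BTok) (t : BTok) (ht : t ≠ BTok.star) :
    bstep s t ((List.tails s).map (fun u => brmatch tks u))
      = (List.tails s).map (fun u => brmatch (t :: tks) u) := by
  induction s with
  | nil => simp [bstep, if_neg ht, brmatch_nil_nonstar tks t ht]
  | cons c s' ih =>
      cases s' with
      | nil =>
          simp [bstep, if_neg ht, brmatch_nil_nonstar tks t ht,
                brmatch_cons_nonstar tks t ht]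
      | cons d t' =>
          simp only [bstep, if_neg ht, List.tails_cons, List.map_cons, List.tail_cons,
                     List.zip_cons_cons, List.map] at ih ⊢
          simp [List.cons_append, ih, brmatch_cons_nonstar tks t ht]

theorem bdp_main (s : List Char) (toks : List BTok) :
    toks.foldr (fun t dp => bstep s t dp) (List.replicate s.length false ++ [true])
      = (List.tails s).map (fun u => brmatch toks u) := by
  induction toks with
  | nil => simp [bdp_init]
  | cons t ts ih =>
      by_cases ht : t = BTok.star
      · subst ht
        rw [List.foldr_cons, ih]
        simpa [bstep] using bdp_star s ts
      · simp [List.foldr_cons, ih, ← bdp_nonstar s ts t ht]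

theorem bmatch_eq_brmatch (toks : List BTok) (s : List Char) :
    bmatch toks s = brmatch toks s := by
  unfold bmatch
  rw [bdp_main, map_tails_headD]

-- ---------- Part 2: rmatch congruences and an accumulator-free tokenizer ----------

theorem rmatch_nil_nonstar_aux (tks : List GlobTok) (t : GlobTok) (ht : t ≠ GlobTok.star) :
    rmatch (t :: tks) [] = false := by
  cases t <;> simp [rmatch] at *

theorem rmatch_cons_nonstar_aux (tks : List GlobTok) (t : GlobTok) (ht : t ≠ GlobTok.star)
    {c : Char} {s : List Char} :
    rmatch (t :: tks) (c :: s) = (tokMatch t c && rmatch tks s) := by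
  cases t <;> simp [rmatch] at *

theorem rmatch_star_unfold (p : List GlobTok) (c : Char) (s : List Char) :
    rmatch (GlobTok.star :: p) (c :: s)
      = (rmatch p (c :: s) || rmatch (GlobTok.star :: p) s) := by
  conv_lhs => rw [rmatch]

theorem rmatch_star_star (p : List GlobTok) : ∀ (s : List Char),
    rmatch (GlobTok.star :: GlobTok.star :: p) s = rmatch (GlobTok.star :: p) s := by
  intro s
  induction s with
  | nil => simp [rmatch]
  | cons c s' ih =>
      rw [rmatch_star_unfold, ih, rmatch_star_unfold p c s']
      cases h : rmatch (GlobTok.star :: p) s' <;> simp [rmatch_star_unfold, h]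

theorem rmatch_append_congr (p q : List GlobTok) (hpq : ∀ s, rmatch p s = rmatch q s) :
    ∀ (s : List Char) (x : List GlobTok), rmatch (x ++ p) s = rmatch (x ++ q) s := by
  intro s
  induction hn : s.length using Nat.strong_induction_on generalizing s with
  | _ n ihn =>
      subst hn
      have ihs : ∀ s' : List Char, s'.length < s.length →
          ∀ x : List GlobTok, rmatch (x ++ p) s' = rmatch (x ++ q) s' := by
        intro s' hlt x
        exact ihn s'.length hlt s' rfl x
      intro x
      induction x with
      | nil => exact hpq s
      | cons t x' ihx =>
          by_cases ht : t = GlobTok.star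
          · subst ht
            have h1 : ∀ l : List GlobTok, rmatch (GlobTok.star :: l) [] = rmatch l [] := by
              intro l
              conv_lhs => rw [rmatch]
              simp
            cases s with
            | nil =>
                simp only [List.cons_append, h1]
                exact ihx
            | cons c s' =>
                have h2 := ihs s' (by simp) (GlobTok.star :: x')
                simp only [List.cons_append] at h2
                simp only [List.cons_append]
                rw [rmatch_star_unfold, rmatch_star_unfold, ihx, h2]
          · cases s with
            | nil => simp only [List.cons_append,
                brmatch_nil_nonstar, rmatch_nil_nonstar_aux _ t ht, rmatch_nil_nonstar_aux _ t ht]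
            | cons c s' =>
                simp only [List.cons_append]
                rw [rmatch_cons_nonstar_aux _ t ht, rmatch_cons_nonstar_aux _ t ht,
                    ihs s' (by simp) x']

def tokSpecA : List Char → List GlobTok
  | [] => []
  | '*' :: r => GlobTok.star :: tokSpecA r
  | '?' :: r => GlobTok.any :: tokSpecA r
  | '[' :: r =>
      match hbs : bracketSpan r with
      | none => GlobTok.lit '[' :: tokSpecA r
      | some (stuff, rest) => setToken stuff :: tokSpecA rest
  | c :: r => GlobTok.lit c :: tokSpecA r
termination_by l => l.length
decreasing_by
  all_goals simp only [List.length_cons]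
  · omega
  · omega
  · omega
  · have := bracketSpan_shrink _ _ _ hbs; omega
  · omega


theorem tokLoop_rmatch : ∀ (l : List Char) (acc : List GlobTok) (s : List Char),
    rmatch (tokLoop acc l) s = rmatch (acc.reverse ++ tokSpecA l) s := by
  intro l
  induction hn : l.length using Nat.strong_induction_on generalizing l with
  | _ n ihn =>
      subst hn
      intro acc s
      cases l with
      | nil => simp [tokLoop, tokSpecA]
      | cons c r =>
        by_cases h1 : c = '*'
        · subst h1
          rw [show tokSpecA ('*' :: r) = GlobTok.star :: tokSpecA r from by rw [tokSpecA]]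
          rcases acc with _ | ⟨t, acc0⟩
          · rw [tokLoop.eq_3 _ _ (by intro tl h; cases h), ihn r.length (by simp) r rfl]; simp
          · cases t with
            | star =>
                rw [tokLoop.eq_2, ihn r.length (by simp) r rfl]
                have hcong := rmatch_append_congr (GlobTok.star :: tokSpecA r)
                  (GlobTok.star :: GlobTok.star :: tokSpecA r)
                  (fun s => (rmatch_star_star (tokSpecA r) s).symm) s acc0.reverse
                simp only [List.reverse_cons, List.append_assoc, List.cons_append, List.nil_append] at hcong ⊢
                exact hcong
            | lit c => rw [tokLoop.eq_3 _ _ (by intro tl h; cases h), ihn r.length (by simp) r rfl]; simp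
            | any => rw [tokLoop.eq_3 _ _ (by intro tl h; cases h), ihn r.length (by simp) r rfl]; simp
            | set b its => rw [tokLoop.eq_3 _ _ (by intro tl h; cases h), ihn r.length (by simp) r rfl]; simp
        · by_cases h2 : c = '?'
          · subst h2
            rw [tokLoop.eq_4, show tokSpecA ('?' :: r) = GlobTok.any :: tokSpecA r from by rw [tokSpecA],
                ihn r.length (by simp) r rfl]
            simp
          · by_cases h3 : c = '['
            · subst h3
              rw [tokLoop.eq_5, tokSpecA.eq_4]
              split
              · rw [ihn r.length (by simp) r rfl]; simp
              · rename_i stuff rest hbs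
                rw [ihn rest.length (by have := bracketSpan_shrink _ _ _ hbs; simp; omega) rest rfl]
                simp
            · rw [tokLoop.eq_6 _ _ _ (fun h => h1 h) (fun h => h2 h) (fun h => h3 h),
                  tokSpecA.eq_5 _ _ (fun h => h1 h) (fun h => h2 h) (fun h => h3 h),
                  ihn r.length (by simp) r rfl]
              simp

theorem fnTokenize_rmatch (p : List Char) (s : List Char) :
    rmatch (fnTokenize p) s = rmatch (tokSpecA p) s := by
  unfold fnTokenize
  rw [tokLoop_rmatch]
  simp

-- ---------- Part 3: token relation and the relational matcher ----------

def TRel (t : GlobTok) (b : BTok) : Prop :=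
  (t = GlobTok.star ∧ b = BTok.star) ∨
  (t ≠ GlobTok.star ∧ b ≠ BTok.star ∧ ∀ c, tokMatch t c = btokMatch b c)

theorem rmatch_rel : ∀ (s : List Char) (ta : List GlobTok) (tb : List BTok),
    List.Forall₂ TRel ta tb → rmatch ta s = brmatch tb s := by
  intro s
  induction hn : s.length using Nat.strong_induction_on generalizing s with
  | _ n ihn =>
      subst hn
      intro ta tb hrel
      induction hrel with
      | nil => cases s <;> simp [rmatch, brmatch]
      | @cons t b ta' tb' hr hrest ihx =>
          rcases hr with ⟨hts, hbs⟩ | ⟨hts, hbs, hm⟩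
          · subst hts; subst hbs
            cases s with
            | nil =>
                rw [show rmatch (GlobTok.star :: ta') [] = (rmatch ta' [] || false) from by
                      conv_lhs => rw [rmatch],
                    show brmatch (BTok.star :: tb') [] = (brmatch tb' [] || false) from by
                      conv_lhs => rw [brmatch]]
                rw [ihx]
            | cons cc s' =>
                rw [show rmatch (GlobTok.star :: ta') (cc :: s')
                      = (rmatch ta' (cc :: s') || rmatch (GlobTok.star :: ta') s') from by
                      conv_lhs => rw [rmatch],
                    show brmatch (BTok.star :: tb') (cc :: s')
                      = (brmatch tb' (cc :: s') || brmatch (BTok.star :: tb') s') from by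
                      conv_lhs => rw [brmatch]]
                rw [ihx, ihn s'.length (by simp) s' rfl _ _ (List.Forall₂.cons (Or.inl ⟨rfl, rfl⟩) hrest)]
          · cases s with
            | nil => rw [rmatch_nil_nonstar_aux _ _ hts, brmatch_nil_nonstar _ _ hbs]
            | cons cc s' =>
                rw [rmatch_cons_nonstar_aux _ _ hts, brmatch_cons_nonstar _ _ hbs, hm,
                    ihn s'.length (by simp) s' rfl _ _ hrest]


-- ---------- Part 4: the three class-span scanners agree ----------

theorem scanClose_cons (c : Char) (r a rest : List Char) (hc : c ≠ ']')
    (h : scanClose (c :: r) = some (a, rest)) :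
    ∃ a', a = c :: a' ∧ scanClose r = some (a', rest) := by
  unfold scanClose at h
  rw [if_neg hc] at h
  cases h2 : scanClose r with
  | none => rw [h2] at h; simp at h
  | some p =>
      rcases p with ⟨a0, r0⟩
      rw [h2] at h
      simp only [Option.map_some] at h
      injection h with h
      obtain ⟨ha, hr⟩ := Prod.mk.injEq .. |>.mp h
      exact ⟨a0, ha.symm, by rw [← hr]⟩

theorem scanClose_nil_head (l rest : List Char) (h : scanClose l = some ([], rest)) :
    ∃ r', l = ']' :: r' := by
  rcases l with _ | ⟨c, r⟩
  · simp [scanClose] at h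
  · by_cases hc : c = ']'
    · exact ⟨r, by rw [hc]⟩
    · obtain ⟨a', ha', -⟩ := scanClose_cons c r [] rest hc h
      simp at ha'

theorem bfindClose_eq_scanClose : ∀ l, bfindClose l = scanClose l := by
  intro l
  induction l with
  | nil => rfl
  | cons c r ih => simp [bfindClose, scanClose, ih]

-- proof-side description of the class spans Pre_ talks about
def preClose : List Char → Option (List Char × List Char)
  | [] => none
  | c :: r => if c = ']' then some ([], r) else (preClose r).map (fun p => (c :: p.1, p.2))

-- the body of a class: optional leading '!', then a ']' first is literal
def preBodyOf : List Char → Option (List Char × List Char)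
  | '!' :: ']' :: r => (preClose r).map (fun p => (']' :: p.1, p.2))
  | '!' :: r => preClose r
  | ']' :: r => (preClose r).map (fun p => (']' :: p.1, p.2))
  | r => preClose r

theorem preClose_eq_scanClose : ∀ l, preClose l = scanClose l := by
  intro l
  induction l with
  | nil => rfl
  | cons c r ih => simp [preClose, scanClose, ih]

theorem bscanBody_not_rbrack (l : List Char) (h : l.headD ' ' ≠ ']') :
    bscanBody l = bfindClose l := by
  unfold bscanBody
  split
  · simp at h
  · rfl

def spanmap (p : List Char × List Char) : Bool × List Char × List Char :=
  (p.1.headD ' ' = '!', (if p.1.headD ' ' = '!' then p.1.drop 1 else p.1), p.2)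

theorem bsplit_eq (r : List Char) : bsplit r = (bracketSpan r).map spanmap := by
  rcases r with _ | ⟨c, r1⟩
  · rfl
  · by_cases hc : c = '!'
    · subst hc
      rcases r1 with _ | ⟨c2, r2⟩
      · rfl
      · by_cases hc2 : c2 = ']'
        · subst hc2
          show (bscanBody (']' :: r2)).map _ = _
          unfold bscanBody bracketSpan bracketPre
          simp only [bfindClose_eq_scanClose]
          cases h : scanClose r2 <;> simp [spanmap]
        · show (bscanBody (c2 :: r2)).map _ = _
          rw [bscanBody_not_rbrack _ (by simpa using hc2), bfindClose_eq_scanClose]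
          unfold bracketSpan
          rw [show bracketPre ('!' :: c2 :: r2) = (['!'], c2 :: r2) from by
            unfold bracketPre; split <;> simp_all]
          cases h : scanClose (c2 :: r2) with
          | none => rfl
          | some p =>
              obtain ⟨a0, r0⟩ := p
              obtain ⟨a', ha', -⟩ := scanClose_cons c2 r2 a0 r0 (by simpa using hc2) (by simpa using h)
              subst ha'
              simp [spanmap, hc2]
    · have hb : bsplit (c :: r1) = (bscanBody (c :: r1)).map (fun p => (false, p.1, p.2)) := by
        unfold bsplit
        split <;> simp_all
      rw [hb]
      by_cases hc2 : c = ']'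
      · subst hc2
        show (bscanBody (']' :: r1)).map _ = _
        unfold bscanBody bracketSpan bracketPre
        simp only [bfindClose_eq_scanClose]
        cases h : scanClose r1 <;> simp [spanmap]
      · rw [bscanBody_not_rbrack _ (by simpa using hc2), bfindClose_eq_scanClose]
        unfold bracketSpan
        rw [show bracketPre (c :: r1) = ([], c :: r1) from by
          unfold bracketPre; split <;> simp_all]
        cases h : scanClose (c :: r1) with
        | none => rfl
        | some p =>
            obtain ⟨a0, r0⟩ := p
            obtain ⟨a', ha', -⟩ := scanClose_cons c r1 a0 r0 (by simpa using hc2) (by simpa using h)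
            subst ha'
            simp [spanmap, hc, hc2]

theorem preBodyOf_eq (r : List Char) : preBodyOf r = (bsplit r).map (fun q => (q.2.1, q.2.2)) := by
  rcases r with _ | ⟨c, r1⟩
  · rfl
  · by_cases hc : c = '!'
    · subst hc
      rcases r1 with _ | ⟨c2, r2⟩
      · rfl
      · by_cases hc2 : c2 = ']'
        · subst hc2
          show _ = ((bscanBody (']' :: r2)).map _).map _
          unfold preBodyOf bscanBody
          simp only [preClose_eq_scanClose, bfindClose_eq_scanClose]
          cases h : scanClose r2 <;> simp
        · show _ = ((bscanBody (c2 :: r2)).map _).map _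
          rw [bscanBody_not_rbrack _ (by simpa using hc2)]
          rw [show preBodyOf ('!' :: c2 :: r2) = preClose (c2 :: r2) from by
            unfold preBodyOf; split <;> simp_all]
          simp only [preClose_eq_scanClose, bfindClose_eq_scanClose]
          cases h : scanClose (c2 :: r2) <;> simp
    · have hb : bsplit (c :: r1) = (bscanBody (c :: r1)).map (fun p => (false, p.1, p.2)) := by
        unfold bsplit
        split <;> simp_all
      rw [hb]
      by_cases hc2 : c = ']'
      · subst hc2
        unfold preBodyOf bscanBody
        simp only [preClose_eq_scanClose, bfindClose_eq_scanClose]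
        cases h : scanClose r1 <;> simp
      · rw [bscanBody_not_rbrack _ (by simpa using hc2)]
        rw [show preBodyOf (c :: r1) = preClose (c :: r1) from by
          unfold preBodyOf; split <;> simp_all]
        simp only [preClose_eq_scanClose, bfindClose_eq_scanClose]
        cases h : scanClose (c :: r1) <;> simp

theorem bracketSpan_stuff_ne_nil (r stuff rest : List Char)
    (h : bracketSpan r = some (stuff, rest)) : stuff ≠ [] := by
  unfold bracketSpan at h
  simp only [Option.map_eq_some_iff] at h
  obtain ⟨p, hp, he⟩ := h
  injection he with h1 h2
  subst h1
  unfold bracketPre at hp ⊢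
  split at hp
  · simp
  · simp
  · simp
  · rename_i r0 hn1 hn2 hn3
    obtain ⟨a0, r1⟩ := p
    have hp' : scanClose r = some (a0, r1) := hp
    simp only [List.nil_append]
    intro hnil
    subst hnil
    obtain ⟨r', hr'⟩ := scanClose_nil_head _ _ hp'
    exact hn3 r' hr'


-- ---------- Part 5: fnmatch's chunk machinery = the simple class grammar ----------

def toG : BItem → GlobItem
  | BItem.chr c => GlobItem.lit c
  | BItem.rng lo hi => GlobItem.rng lo hi

theorem toG_match (c : Char) (i : BItem) : itemMatch c (toG i) = bitemMatch c i := by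
  cases i <;> rfl

theorem any_map_toG (c : Char) (items : List BItem) :
    (items.map toG).any (itemMatch c) = items.any (bitemMatch c) := by
  induction items with
  | nil => rfl
  | cons i r ih => simp [List.any_cons, toG_match, ih]

-- (5a) dash-free bodies are all-literal under both parsers
theorem bitems_tail_dashfree : ∀ (l : List Char), '-' ∉ l.tail → bitems l = l.map BItem.chr := by
  intro l
  induction l with
  | nil => intro _; rfl
  | cons a rest ih =>
      intro h
      simp only [List.tail_cons] at h
      have hfire : ∀ (b : Char) (rest1 : List Char), rest = '-' :: b :: rest1 → False := by
        intro b rest1 he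
        exact h (he ▸ List.mem_cons_self)
      rw [bitems.eq_2 a rest hfire, List.map_cons, ih]
      intro hm
      rcases rest with _ | ⟨x, rest'⟩
      · simp at hm
      · exact h (List.mem_cons_of_mem _ hm)

-- (5a') a single trailing '-' is also literal
theorem bitems_trailing_dash : ∀ (pre : List Char), pre ≠ [] → '-' ∉ pre.tail →
    bitems (pre ++ ['-']) = (pre ++ ['-']).map BItem.chr := by
  intro pre
  induction pre with
  | nil => intro h _; exact absurd rfl h
  | cons a pre' ih =>
      intro _ h
      simp only [List.tail_cons] at h
      rcases pre' with _ | ⟨x, pre''⟩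
      · rw [show (([a] : List Char) ++ ['-']) = [a, '-'] from rfl]
        rw [bitems.eq_2 a ['-'] (by intro b r1 he; injection he with e1 e2; cases e2),
            bitems.eq_2 '-' [] (by intro b r1 he; cases he)]
        rfl
      · have hx : x ≠ '-' := fun he => h (he ▸ List.mem_cons_self)
        rw [List.cons_append]
        rw [bitems.eq_2 a ((x :: pre'') ++ ['-']) (by
          intro b r1 he
          rw [List.cons_append] at he
          injection he with e1 e2
          exact hx e1)]
        rw [ih (by simp) (fun hm => h (List.mem_cons_of_mem _ hm)), List.map_cons]

-- (5b) prepending one character shifts the chunk split by one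
def consHead (a : Char) : List (List Char) → List (List Char)
  | [] => [[a]]
  | c :: r => (a :: c) :: r

theorem findDash_shift (a : Char) (l : List Char) (off : Nat) :
    findDash (a :: l) (off + 1) = (findDash l off).map (· + 1) := by
  unfold findDash
  rw [show (a :: l).drop (off + 1) = l.drop off from by simp]
  cases h : (l.drop off).findIdx? (fun c => c = '-') <;> simp [h]
  omega

theorem chunksLoop_shift (a : Char) (l : List Char) (off : Nat) :
    chunksLoop (a :: l) (off + 1) = consHead a (chunksLoop l off) := by
  rw [chunksLoop.eq_1 (a :: l), chunksLoop.eq_1 l, findDash_shift]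
  cases h : findDash l off with
  | none =>
      simp only [Option.map_none]
      rcases l with _ | ⟨x, l'⟩ <;> simp [consHead]
  | some k =>
      simp only [Option.map_some]
      rw [show (a :: l).drop (k + 1 + 1) = l.drop (k + 1) from by simp]
      rw [show (a :: l).take (k + 1) = a :: l.take k from by simp]
      cases hr : chunksLoop (l.drop (k + 1)) 2 with
      | nil => simp [consHead]
      | cons d r' => simp [consHead]

theorem consHead_ne_nil (a : Char) (chs : List (List Char)) : consHead a chs ≠ [] := by
  cases chs <;> simp [consHead]

-- (5c) once the range head is consumed, the leading character is irrelevant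
theorem itemsOf_true_cons (h : Char) (c0 : List Char) (rest : List (List Char)) :
    itemsOf true ((h :: c0) :: rest) = itemsOf false (c0 :: rest) := by
  cases rest with
  | nil => simp [itemsOf.eq_2]
  | cons c2 r => simp [itemsOf.eq_3]

-- (5d) what a successful dash search says about the body
theorem findDash_none_tail (l : List Char) (h : findDash l 1 = none) : '-' ∉ l.tail := by
  unfold findDash at h
  simp only [Option.map_eq_none_iff, List.findIdx?_eq_none_iff] at h
  intro hm
  rcases l with _ | ⟨a, t⟩
  · simp at hm
  · simp only [List.tail_cons] at hm
    have := h '-' (by simpa using hm)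
    simp at this

theorem findIdx?_dash_some : ∀ (t : List Char) (j : Nat),
    t.findIdx? (fun c => c = '-') = some j →
    t = t.take j ++ '-' :: t.drop (j + 1) ∧ '-' ∉ t.take j := by
  intro t
  induction t with
  | nil => intro j h; simp at h
  | cons c t' ih =>
      intro j h
      rw [List.findIdx?_cons] at h
      by_cases hc : c = '-'
      · subst hc
        simp at h
        subst h
        simp
      · simp only [hc, decide_false] at h
        rw [if_neg (by simp)] at h
        simp only [Option.map_eq_some_iff] at h
        obtain ⟨j', hj', hjj⟩ := h
        obtain ⟨hdec, hnm⟩ := ih j' hj'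
        subst hjj
        constructor
        · rw [show (c :: t').take (j' + 1) = c :: t'.take j' from by simp,
              show (c :: t').drop (j' + 1 + 1) = t'.drop (j' + 1) from by simp]
          rw [List.cons_append]
          conv_lhs => rw [hdec]
        · rw [show (c :: t').take (j' + 1) = c :: t'.take j' from by simp]
          intro hm
          rcases List.mem_cons.mp hm with he | hm2
          · exact hc he.symm
          · exact hnm hm2

theorem findDash1_some (l : List Char) (k : Nat) (h : findDash l 1 = some k) :
    1 ≤ k ∧ l = l.take k ++ '-' :: l.drop (k + 1) ∧ '-' ∉ (l.take k).tail ∧ l.take k ≠ [] := by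
  unfold findDash at h
  simp only [Option.map_eq_some_iff] at h
  obtain ⟨j, hj, hk⟩ := h
  subst hk
  rcases l with _ | ⟨a, t⟩
  · simp at hj
  · simp only [List.drop_succ_cons, List.drop_zero] at hj
    obtain ⟨hdec, hnm⟩ := findIdx?_dash_some t j hj
    refine ⟨by omega, ?_, ?_, by simp⟩
    · rw [show (a :: t).take (j + 1) = a :: t.take j from by simp,
          show (a :: t).drop (j + 1 + 1) = t.drop (j + 1) from by simp,
          List.cons_append]
      conv_lhs => rw [hdec]
    · rw [show (a :: t).take (j + 1) = a :: t.take j from by simp]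
      simpa using hnm

-- (5e) the simple grammar on a body with its first splitting dash exposed
theorem bitems_decomp : ∀ (pre suf : List Char), pre ≠ [] → '-' ∉ pre.tail → suf ≠ [] →
    bitems (pre ++ '-' :: suf)
      = pre.dropLast.map BItem.chr
        ++ BItem.rng (pre.getLastD ' ') (suf.headD ' ') :: bitems suf.tail := by
  intro pre
  induction pre with
  | nil => intro suf h; exact absurd rfl h
  | cons a pre' ih =>
      intro suf _ hdash hsuf
      simp only [List.tail_cons] at hdash
      rcases pre' with _ | ⟨x, pre''⟩
      · rcases suf with _ | ⟨sh, st⟩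
        · exact absurd rfl hsuf
        · rw [show ([a] ++ '-' :: sh :: st : List Char) = a :: '-' :: sh :: st from rfl,
              bitems.eq_1]
          simp
      · have hx : x ≠ '-' := fun he => hdash (he ▸ List.mem_cons_self)
        rw [List.cons_append,
            bitems.eq_2 a ((x :: pre'') ++ '-' :: suf) (by
              intro b r1 he
              rw [List.cons_append] at he
              injection he with e1 e2
              exact hx e1),
            ih suf (by simp) (fun hm => hdash (List.mem_cons_of_mem _ hm)) hsuf]
        simp

theorem okBody_cons3 (a b c : Char) (r : List Char) :
    okBody (a :: b :: c :: r) = ((!(b == '-') || decide (a ≤ c)) && okBody (b :: c :: r)) := by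
  simp [okBody, List.all_cons]

theorem okT_tail (a : Char) (l : List Char) (h : okBody (a :: l) = true) : okBody l = true := by
  rcases l with _ | ⟨b, _ | ⟨c, r⟩⟩
  · rfl
  · rfl
  · rw [okBody_cons3] at h
    exact (Bool.and_eq_true_iff.mp h).2

theorem okT_boundary : ∀ (u : List Char) (x y : Char) (v : List Char),
    okBody (u ++ x :: '-' :: y :: v) = true → x ≤ y := by
  intro u
  induction u with
  | nil =>
      intro x y v h
      rw [List.nil_append, okBody_cons3] at h
      have := (Bool.and_eq_true_iff.mp h).1
      simpa using this
  | cons a u' ih =>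
      intro x y v h
      rw [List.cons_append] at h
      exact ih x y v (okT_tail a _ h)

theorem okT_suffix : ∀ (w l : List Char), okBody (w ++ l) = true → okBody l = true := by
  intro w
  induction w with
  | nil => intro l h; exact h
  | cons a w' ih =>
      intro l h
      rw [List.cons_append] at h
      exact ih l (okT_tail a _ h)

-- (5f) composing the chunk split with '-'-join semantics gives the simple grammar
theorem map_toG_chr (l : List Char) : (l.map BItem.chr).map toG = l.map GlobItem.lit := by
  rw [List.map_map]
  rfl

theorem findDash_ge (l : List Char) (off k : Nat) (h : findDash l off = some k) : off ≤ k := by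
  unfold findDash at h
  simp only [Option.map_eq_some_iff] at h
  obtain ⟨j, hj, hk⟩ := h
  omega

theorem findDash_nil (off : Nat) : findDash [] off = none := by
  unfold findDash
  simp

theorem chunksLoop_ne_nil (l : List Char) (off : Nat) (hl : l ≠ []) : chunksLoop l off ≠ [] := by
  rw [chunksLoop.eq_1]
  split
  · simp [hl]
  · rename_i k hfd
    by_cases hr : chunksLoop (l.drop (k + 1)) 2 = [] <;> simp [hr]

theorem chunksLoop_nil (off : Nat) : chunksLoop [] off = [] := by
  rw [chunksLoop.eq_1, findDash_nil]
  rfl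

theorem getLastD_indep (l : List Char) (hl : l ≠ []) (a b : Char) :
    l.getLastD a = l.getLastD b := by
  rw [List.getLastD_eq_getLast?, List.getLastD_eq_getLast?]
  cases h : l.getLast? with
  | none => exact absurd (List.getLast?_eq_none_iff.mp h) hl
  | some x => rfl

theorem P1 : ∀ (body : List Char),
    itemsOf false (chunksLoop body 1) = (bitems body).map toG := by
  intro body
  induction hn : body.length using Nat.strong_induction_on generalizing body with
  | _ n ihn =>
      subst hn
      rw [chunksLoop.eq_1]
      cases hfd : findDash body 1 with
      | none =>
          rcases hb : body with _ | ⟨a, t⟩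
          · simp [itemsOf.eq_1, bitems.eq_3]
          · rw [← hb]
            have hbn : body ≠ [] := by rw [hb]; simp
            simp only [if_neg hbn]
            rw [itemsOf.eq_2, bitems_tail_dashfree body (findDash_none_tail body hfd), map_toG_chr]
            simp
      | some k =>
          obtain ⟨hk1, hdec, hpd, hpn⟩ := findDash1_some body k hfd
          simp only []
          cases hsuf : body.drop (k + 1) with
          | nil =>
              rw [chunksLoop_nil]
              simp only [reduceIte]
              rw [itemsOf.eq_2]
              conv_rhs => rw [hdec, hsuf]
              rw [show (body.take k ++ '-' :: ([] : List Char)) = body.take k ++ ['-'] from rfl,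
                  bitems_trailing_dash (body.take k) hpn hpd, map_toG_chr]
              simp
          | cons h t =>
              rw [chunksLoop_shift h t 1]
              have hrest : consHead h (chunksLoop t 1) ≠ [] := consHead_ne_nil _ _
              rw [if_neg hrest]
              have iht : itemsOf false (chunksLoop t 1) = (bitems t).map toG := by
                apply ihn t.length _ t rfl
                have hlen := congrArg List.length hsuf
                simp at hlen
                omega
              have hhead : ∀ cs, ((consHead h cs).headD []).headD 'a' = h := by
                intro cs
                cases cs <;> simp [consHead]
              conv_rhs => rw [hdec, hsuf]
              rw [bitems_decomp _ _ hpn hpd (by simp)]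
              simp only [List.headD_cons, List.tail_cons, List.map_append, List.map_cons, map_toG_chr]
              cases hch : chunksLoop t 1 with
              | nil =>
                  have ht : t = [] := by
                    by_contra hne
                    exact chunksLoop_ne_nil t 1 hne hch
                  simp only [consHead]
                  rw [itemsOf.eq_3]
                  simp only [Bool.false_eq_true, if_false, if_neg hpn]
                  rw [show itemsOf true [[h]] = List.map GlobItem.lit (List.drop 1 [h]) from itemsOf.eq_2 true [h],
                      ht]
                  simp [bitems.eq_3, toG]
                  cases hgl : (List.take k body).getLast? with
                  | none => exact absurd (List.getLast?_eq_none_iff.mp hgl) hpn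
                  | some x => rfl
              | cons c0 r0 =>
                  simp only [consHead]
                  rw [itemsOf.eq_3]
                  simp only [Bool.false_eq_true, if_false, if_neg hpn]
                  rw [itemsOf_true_cons, ← hch, iht]
                  simp [toG]
                  cases hgl : (List.take k body).getLast? with
                  | none => exact absurd (List.getLast?_eq_none_iff.mp hgl) hpn
                  | some x => rfl

-- (5g) with no reversed range, the empty-range merge pass is the identity
def Good (c1 c2 : List Char) : Prop := ¬ (c2.headD 'a' < c1.getLastD 'a')

def ChainG : List (List Char) → Prop
  | c1 :: c2 :: rest => Good c1 c2 ∧ ChainG (c2 :: rest)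
  | _ => True

theorem merge_id : ∀ (chs : List (List Char)), ChainG chs → mergeChunks chs = chs := by
  intro chs
  induction chs with
  | nil => intro _; rfl
  | cons c1 rest ih =>
      intro hch
      rcases rest with _ | ⟨c2, rest'⟩
      · rfl
      · obtain ⟨hgood, htail⟩ := hch
        rw [mergeChunks, ih htail]
        simp only []
        rw [if_neg hgood]

theorem chunksLoop_mem_ne_nil : ∀ (l : List Char) (off : Nat), 1 ≤ off →
    ∀ ch ∈ chunksLoop l off, ch ≠ [] := by
  intro l
  induction hn : l.length using Nat.strong_induction_on generalizing l with
  | _ n ihn =>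
      subst hn
      intro off hoff ch hm
      rw [chunksLoop.eq_1] at hm
      split at hm
      · rename_i hfd
        by_cases hl : l = []
        · simp [hl] at hm
        · simp [hl] at hm
          rw [hm]
          exact hl
      · rename_i k hfd
        have hk := findDash_ge l off k hfd
        have hl : l ≠ [] := by
          intro he
          rw [he, findDash_nil] at hfd
          cases hfd
        have hlen : (l.drop (k + 1)).length < l.length := by
          have : 0 < l.length := List.length_pos_iff.mpr hl
          simp
          omega
        have htk : l.take k ≠ [] := by
          simp [hl]
          omega
        by_cases hr : chunksLoop (l.drop (k + 1)) 2 = []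
        · simp only [hr, if_pos rfl] at hm
          simp at hm
          rw [hm]
          simp
        · simp only [hr, if_neg hr] at hm
          rcases List.mem_cons.mp hm with he | hm2
          · rw [he]; exact htk
          · exact ihn (l.drop (k + 1)).length hlen _ rfl 2 (by omega) ch hm2

theorem ChainG_consHead (h : Char) (Ch : List (List Char))
    (hne : ∀ ch ∈ Ch, ch ≠ []) (hc : ChainG Ch) : ChainG (consHead h Ch) := by
  cases Ch with
  | nil => simp [consHead, ChainG]
  | cons c0 r0 =>
      simp only [consHead]
      cases r0 with
      | nil => simp [ChainG]
      | cons c1 r1 =>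
          obtain ⟨hg, ht⟩ := hc
          refine ⟨?_, ht⟩
          unfold Good at hg ⊢
          have hc0 : c0 ≠ [] := hne c0 List.mem_cons_self
          rw [show (h :: c0).getLastD 'a' = c0.getLastD 'a' from by
            cases c0 with
            | nil => exact absurd rfl hc0
            | cons y ys => simp [List.getLastD_cons]]
          exact hg

theorem chainOk : ∀ (body : List Char), okBody body = true →
    ChainG (chunksLoop body 1) := by
  intro body
  induction hn : body.length using Nat.strong_induction_on generalizing body with
  | _ n ihn =>
      subst hn
      intro hok
      rw [chunksLoop.eq_1]
      cases hfd : findDash body 1 with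
      | none =>
          by_cases hb : body = [] <;> simp [hb, ChainG]
      | some k =>
          obtain ⟨hk1, hdec, hpd, hpn⟩ := findDash1_some body k hfd
          simp only []
          cases hsuf : body.drop (k + 1) with
          | nil =>
              rw [chunksLoop_nil]
              simp [ChainG]
          | cons h t =>
              rw [chunksLoop_shift h t 1]
              rw [if_neg (consHead_ne_nil _ _)]
              have hsplit : body = (body.take k).dropLast
                  ++ (body.take k).getLastD ' ' :: '-' :: h :: t := by
                conv_lhs => rw [hdec, hsuf]
                rcases hpre : body.take k with _ | ⟨p0, ps⟩
                · exact absurd hpre hpn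
                · rw [← hpre]
                  rw [show (body.take k).getLastD ' ' :: '-' :: h :: t
                        = [(body.take k).getLastD ' '] ++ '-' :: h :: t from rfl,
                      ← List.append_assoc]
                  congr 1
                  rw [List.getLastD_eq_getLast?, List.getLast?_eq_getLast hpn]
                  exact (List.dropLast_append_getLast hpn).symm
              have hle : (body.take k).getLastD ' ' ≤ h := by
                apply okT_boundary (body.take k).dropLast _ h t
                rw [← hsplit]
                exact hok
              have hokt : okBody t = true := by
                apply okT_suffix ((body.take k).dropLast
                  ++ [(body.take k).getLastD ' ', '-', h])
                rw [show ((body.take k).dropLast ++ [(body.take k).getLastD ' ', '-', h]) ++ t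
                      = (body.take k).dropLast ++ (body.take k).getLastD ' ' :: '-' :: h :: t from by
                    simp]
                rw [← hsplit]
                exact hok
              have iht : ChainG (chunksLoop t 1) := by
                apply ihn t.length _ t rfl hokt
                have hlen := congrArg List.length hsuf
                simp at hlen
                omega
              have hne := chunksLoop_mem_ne_nil t 1 (by omega)
              cases hch : chunksLoop t 1 with
              | nil =>
                  simp only [consHead]
                  refine ⟨?_, trivial⟩
                  unfold Good
                  simp only [List.headD_cons]
                  rw [getLastD_indep _ hpn 'a' ' ']
                  exact not_lt.mpr hle
              | cons c0 r0 =>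
                  simp only [consHead]
                  refine ⟨?_, ?_⟩
                  · unfold Good
                    simp only [List.headD_cons]
                    rw [getLastD_indep _ hpn 'a' ' ']
                    exact not_lt.mpr hle
                  · rw [hch] at hne iht
                    have := ChainG_consHead h (c0 :: r0) hne iht
                    simpa only [consHead] using this


-- (5h) the class token of fnmatch equals the simple-grammar class, given okBody
theorem tokMatch_set_map (neg : Bool) (items : List BItem) (c : Char) :
    tokMatch (GlobTok.set neg (items.map toG)) c = btokMatch (BTok.cls neg items) c := by
  rw [show tokMatch (GlobTok.set neg (items.map toG)) c
        = (((items.map toG).any (itemMatch c)) != neg) from rfl,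
      show btokMatch (BTok.cls neg items) c = ((items.any (bitemMatch c)) != neg) from rfl,
      any_map_toG]

theorem TRel_set (neg : Bool) (items : List BItem) (gitems : List GlobItem)
    (h : gitems = items.map toG) :
    TRel (GlobTok.set neg gitems) (BTok.cls neg items) := by
  refine Or.inr ⟨by simp, by simp, fun c => ?_⟩
  rw [h, tokMatch_set_map]

theorem TRel_set_true_nil : TRel (GlobTok.set true []) (BTok.cls true []) :=
  TRel_set true [] [] rfl

theorem take_headD (l : List Char) (k : Nat) (hk : 1 ≤ k) (hl : l ≠ []) (d : Char) :
    (l.take k).headD d = l.headD d := by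
  rcases l with _ | ⟨a, t⟩
  · exact absurd rfl hl
  · rcases k with _ | k'
    · omega
    · simp

theorem chunksLoop_headD (body : List Char) (hb : body ≠ []) (d : Char) :
    ((chunksLoop body 1).headD []).headD d = body.headD d := by
  rw [chunksLoop.eq_1]
  split
  · simp [hb]
  · rename_i k hfd
    have hk := findDash_ge body 1 k hfd
    by_cases hr : chunksLoop (body.drop (k + 1)) 2 = []
    · simp only [hr]
      simp only [if_true]
      rw [List.headD_cons]
      have htk : body.take k ≠ [] := by simp [hb]; omega
      rcases hh : body.take k with _ | ⟨x, xs⟩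
      · exact absurd hh htk
      · rw [List.cons_append, List.headD_cons]
        have ht2 := take_headD body k hk hb d
        rw [hh] at ht2
        simp only [List.headD_cons] at ht2
        exact ht2
    · simp only [hr, if_neg hr, List.headD_cons]
      exact take_headD body k hk hb d

theorem contains_dash_append (neg : Bool) (body : List Char) :
    (((if neg then ['!'] else []) ++ body).contains '-') = body.contains '-' := by
  cases neg <;> simp

theorem setToken_dash (stuff : List Char) (hcont : stuff.contains '-' = true)
    (chunks : List (List Char)) (hme : mergeChunks (chunksOf stuff) = chunks)
    (hg1 : chunks ≠ [[]]) (hg2 : chunks ≠ [['!']]) :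
    setToken stuff
      = GlobTok.set (decide ((chunks.headD []).headD ' ' = '!'))
          (itemsOf false (if (chunks.headD []).headD ' ' = '!'
            then (chunks.headD []).drop 1 :: chunks.drop 1 else chunks)) := by
  unfold setToken
  rw [if_neg (by rw [hcont]; simp), hme, if_neg hg1, if_neg hg2]

theorem class_rel (body : List Char) (neg : Bool)
    (hnn : ((if neg then ['!'] else []) ++ body) ≠ [])
    (hhd : neg = false → body.headD ' ' ≠ '!')
    (hok : okBody body = true) :
    TRel (setToken ((if neg then ['!'] else []) ++ body)) (BTok.cls neg (bitems body)) := by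
  by_cases hdash : '-' ∈ body
  · -- dash case: chunk machinery, merge is the identity
    have hb : body ≠ [] := by rintro rfl; simp at hdash
    have hcont : (((if neg then ['!'] else []) ++ body).contains '-') = true := by
      rw [contains_dash_append]
      simpa using hdash
    obtain ⟨c0, r0, hch⟩ : ∃ c0 r0, chunksLoop body 1 = c0 :: r0 := by
      rcases h : chunksLoop body 1 with _ | ⟨c0, r0⟩
      · exact absurd h (chunksLoop_ne_nil body 1 hb)
      · exact ⟨c0, r0, rfl⟩
    have hc0ne : c0 ≠ [] :=
      chunksLoop_mem_ne_nil body 1 (by omega) c0 (hch ▸ List.mem_cons_self)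
    have hchain : ChainG (chunksLoop body 1) := chainOk body hok
    cases neg with
    | true =>
        have hstuff : ((if true then ['!'] else []) ++ body) = '!' :: body := by simp
        have hchof : chunksOf ('!' :: body) = consHead '!' (chunksLoop body 1) := by
          unfold chunksOf
          rw [show (('!' :: body).headD ' ') = '!' from rfl, if_pos rfl]
          exact chunksLoop_shift '!' body 1
        have hme : mergeChunks (chunksOf ('!' :: body)) = ('!' :: c0) :: r0 := by
          rw [hchof, hch]
          rw [show consHead '!' (c0 :: r0) = ('!' :: c0) :: r0 from rfl]
          apply merge_id
          rw [show (('!' :: c0) :: r0) = consHead '!' (c0 :: r0) from rfl, ← hch]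
          exact ChainG_consHead '!' _ (chunksLoop_mem_ne_nil body 1 (by omega)) hchain
        rw [hstuff, setToken_dash ('!' :: body) (by simpa using hcont) _ hme
              (by simp) (by simp [hc0ne])]
        show TRel (GlobTok.set (decide ((('!' :: c0).headD ' ') = '!'))
            (itemsOf false (if (('!' :: c0).headD ' ') = '!'
              then ('!' :: c0).drop 1 :: r0 else ('!' :: c0) :: r0))) (BTok.cls true (bitems body))
        rw [if_pos (by simp), show (decide ((('!' :: c0).headD ' ') = '!')) = true from by simp]
        rw [show ('!' :: c0).drop 1 = c0 from rfl, ← hch, P1]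
        exact TRel_set true (bitems body) _ rfl
    | false =>
        have hstuff : ((if false then ['!'] else []) ++ body) = body := by simp
        have hc0hd : c0.headD ' ' ≠ '!' := by
          have := chunksLoop_headD body hb ' '
          rw [hch, List.headD_cons] at this
          rw [this]
          exact hhd rfl
        have hchof : chunksOf body = chunksLoop body 1 := by
          unfold chunksOf
          rw [if_neg (hhd rfl)]
        have hme : mergeChunks (chunksOf body) = c0 :: r0 := by
          rw [hchof, hch, ← hch]
          exact merge_id _ hchain
        rw [hstuff, setToken_dash body (by simpa using hcont) _ hme
              (by simp [hc0ne]) (by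
                intro he
                injection he with e1 e2
                rw [e1] at hc0hd
                simp at hc0hd)]
        show TRel (GlobTok.set (decide ((c0.headD ' ') = '!'))
            (itemsOf false (if (c0.headD ' ') = '!'
              then c0.drop 1 :: r0 else c0 :: r0))) (BTok.cls false (bitems body))
        rw [if_neg hc0hd, show (decide ((c0.headD ' ') = '!')) = false from decide_eq_false hc0hd]
        rw [← hch, P1]
        exact TRel_set false (bitems body) _ rfl
  · -- no dash: both classes are plain literal lists
    have hcont : (((if neg then ['!'] else []) ++ body).contains '-') = false := by
      rw [contains_dash_append]
      simpa using hdash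
    have hbi : bitems body = body.map BItem.chr := by
      apply bitems_tail_dashfree
      intro hm
      rcases body with _ | ⟨a, t⟩
      · simp at hm
      · exact hdash (List.mem_cons_of_mem _ hm)
    cases neg with
    | true =>
        have hstuff : ((if true then ['!'] else []) ++ body) = '!' :: body := by simp
        rw [hstuff]
        rw [hstuff] at hcont
        unfold setToken
        rw [if_pos (by rw [hcont]; simp)]
        show TRel (if body = [] then GlobTok.set true []
            else GlobTok.set (decide ((('!' :: body).headD ' ') = '!')) (body.map GlobItem.lit))
          (BTok.cls true (bitems body))
        rcases body with _ | ⟨a, t⟩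
        · rw [if_pos rfl]
          exact TRel_set_true_nil
        · rw [if_neg (by simp), show (decide (((('!' :: a :: t).headD ' ') = '!'))) = true from by simp]
          rw [hbi, ← map_toG_chr]
          exact TRel_set true _ _ rfl
    | false =>
        have hstuff : ((if false then ['!'] else []) ++ body) = body := by simp
        have hbne : body ≠ [] := by
          intro he
          apply hnn
          simp [he]
        rw [hstuff]
        rw [hstuff] at hcont
        unfold setToken
        rw [if_pos (by rw [hcont]; simp)]
        show TRel (if (if body.headD ' ' = '!' then body.drop 1 else body) = []
            then GlobTok.set true []
            else GlobTok.set (decide ((body.headD ' ') = '!'))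
              ((if body.headD ' ' = '!' then body.drop 1 else body).map GlobItem.lit))
          (BTok.cls false (bitems body))
        rw [if_neg (hhd rfl), if_neg hbne,
            show (decide ((body.headD ' ') = '!')) = false from decide_eq_false (hhd rfl)]
        rw [hbi, ← map_toG_chr]
        exact TRel_set false _ _ rfl


-- ---------- Part 6: related token streams ----------

theorem TRel_lit (c : Char) : TRel (GlobTok.lit c) (BTok.chr c) :=
  Or.inr ⟨by simp, by simp, fun _ => rfl⟩

theorem TRel_any : TRel GlobTok.any BTok.any :=
  Or.inr ⟨by simp, by simp, fun _ => rfl⟩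

theorem preClose_suffix : ∀ (l a rest : List Char), preClose l = some (a, rest) → rest <:+ l := by
  intro l
  induction l with
  | nil => intro a rest h; simp [preClose] at h
  | cons c t ih =>
      intro a rest h
      unfold preClose at h
      by_cases hc : c = ']'
      · simp [hc] at h
        rw [← h.2]
        exact List.suffix_cons c t
      · simp [hc] at h
        obtain ⟨p, hp, he⟩ := h
        exact (ih p rest hp).trans (List.suffix_cons c t)

theorem preBodyOf_suffix : ∀ (r body rest : List Char), preBodyOf r = some (body, rest) → rest <:+ r := by
  intro r body rest h
  unfold preBodyOf at h
  split at h
  · simp only [Option.map_eq_some_iff] at h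
    obtain ⟨p, hp, he⟩ := h
    injection he with h1 h2
    subst h2
    exact ((preClose_suffix _ _ _ (by rw [hp])).trans (List.suffix_cons _ _)).trans (List.suffix_cons _ _)
  · exact (preClose_suffix _ _ _ h).trans (List.suffix_cons _ _)
  · simp only [Option.map_eq_some_iff] at h
    obtain ⟨p, hp, he⟩ := h
    injection he with h1 h2
    subst h2
    exact (preClose_suffix _ _ _ (by rw [hp])).trans (List.suffix_cons _ _)
  · exact preClose_suffix _ _ _ h

theorem okAll_suffix (s t : List Char) (h : s <:+ t) (ht : t.tails.all classOk = true) :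
    s.tails.all classOk = true := by
  rw [List.all_eq_true] at ht ⊢
  intro x hx
  exact ht x ((List.mem_tails _ _).mpr (((List.mem_tails _ _).mp hx).trans h))

theorem okAll_tail (c : Char) (r : List Char) (h : (c :: r).tails.all classOk = true) :
    r.tails.all classOk = true :=
  okAll_suffix r (c :: r) (List.suffix_cons c r) h

theorem okAll_head (p : List Char) (h : p.tails.all classOk = true) : classOk p = true := by
  rw [List.all_eq_true] at h
  exact h p ((List.mem_tails _ _).mpr (List.suffix_refl p))

theorem scanClose_takeWhile : ∀ (l : List Char),
    scanClose l = (if l.contains ']'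
      then some (l.takeWhile (fun c => !(c == ']')), (l.dropWhile (fun c => !(c == ']'))).tail)
      else none) := by
  intro l
  induction l with
  | nil => rfl
  | cons c r ih =>
      by_cases hc : c = ']'
      · subst hc
        simp [scanClose, List.takeWhile_cons, List.dropWhile_cons]
      · have hcb : (c == ']') = false := by simp [hc]
        unfold scanClose
        rw [if_neg hc, ih]
        by_cases hm : r.contains ']'
        · have hcc : ((c :: r).contains ']') = true := by simp_all
          rw [hm, hcc]
          simp [List.takeWhile_cons, List.dropWhile_cons, hcb]
        · have hmf : r.contains ']' = false := by simpa using hm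
          have hcc : ((c :: r).contains ']') = false := by
            simp_all
            exact fun h => hc h.symm
          rw [hmf, hcc]
          simp

theorem preBodyOf_char (r : List Char) :
    preBodyOf r =
      (preClose (if (if r.headD ' ' = '!' then r.tail else r).headD ' ' = ']'
          then (if r.headD ' ' = '!' then r.tail else r).tail
          else (if r.headD ' ' = '!' then r.tail else r))).map
        (fun p => ((if (if r.headD ' ' = '!' then r.tail else r).headD ' ' = ']'
            then [']'] else []) ++ p.1, p.2)) := by
  rcases r with _ | ⟨c, r'⟩
  · rfl
  · by_cases hc : c = '!'
    · subst hc
      rcases r' with _ | ⟨c2, r''⟩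
      · rfl
      · by_cases hc2 : c2 = ']'
        · subst hc2
          simp only [List.headD_cons, if_pos rfl, List.tail_cons]
          rfl
        · rw [show preBodyOf ('!' :: c2 :: r'') = preClose (c2 :: r'') from by
              unfold preBodyOf; split <;> simp_all]
          simp only [List.headD_cons, if_pos rfl, List.tail_cons, if_neg hc2]
          cases h : preClose (c2 :: r'') <;> simp [hc2, h]
    · by_cases hc2 : c = ']'
      · subst hc2
        rw [show preBodyOf (']' :: r') = (preClose r').map (fun p => (']' :: p.1, p.2)) from by
              unfold preBodyOf; split <;> simp_all]
        simp only [List.headD_cons, if_neg hc, if_pos rfl, List.tail_cons]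
        cases h : preClose r' <;> simp [h]
      · rw [show preBodyOf (c :: r') = preClose (c :: r') from by
              unfold preBodyOf; split <;> simp_all]
        simp only [List.headD_cons, if_neg hc, if_neg hc2]
        cases h : preClose (c :: r') <;> simp

theorem classOk_bracket (r : List Char) :
    classOk ('[' :: r)
      = (match preBodyOf r with | none => true | some (body, _) => okBody body) := by
  rw [preBodyOf_char, preClose_eq_scanClose, scanClose_takeWhile]
  show (let r1 := if r.headD ' ' = '!' then r.tail else r
        let r2 := if r1.headD ' ' = ']' then r1.tail else r1
        if r2.contains ']' then
          okBody ((if r1.headD ' ' = ']' then [']'] else []) ++ r2.takeWhile (fun c => !(c == ']')))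
        else true) = _
  simp only []
  by_cases hm : (if (if r.headD ' ' = '!' then r.tail else r).headD ' ' = ']'
      then (if r.headD ' ' = '!' then r.tail else r).tail
      else (if r.headD ' ' = '!' then r.tail else r)).contains ']'
  · rw [if_pos hm, if_pos hm]
    rfl
  · rw [if_neg hm, if_neg hm]
    rfl

theorem classOk_some (r body rest : List Char) (h : preBodyOf r = some (body, rest)) :
    classOk ('[' :: r) = okBody body := by
  rw [classOk_bracket, h]

theorem tok_rel : ∀ (p : List Char), p.tails.all classOk = true →
    List.Forall₂ TRel (tokSpecA p) (btokenize p) := by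
  intro p
  induction hn : p.length using Nat.strong_induction_on generalizing p with
  | _ n ihn =>
      subst hn
      intro hok
      cases p with
      | nil =>
          rw [show tokSpecA [] = [] from by rw [tokSpecA], btokenize.eq_1]
          exact List.Forall₂.nil
      | cons c r =>
          by_cases h3 : c = '['
          · subst h3
            rw [tokSpecA.eq_4, btokenize.eq_4]
            cases hbs : bracketSpan r with
            | none =>
                have hbsp : bsplit r = none := by rw [bsplit_eq, hbs]; rfl
                have hpb : preBodyOf r = none := by rw [preBodyOf_eq, hbsp]; rfl
                rw [hbsp]
                exact List.Forall₂.cons (TRel_lit '[')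
                  (ihn r.length (by simp) r rfl (okAll_tail '[' r hok))
            | some sr =>
                obtain ⟨stuff, rest⟩ := sr
                have hbsp : bsplit r = some (spanmap (stuff, rest)) := by
                  rw [bsplit_eq, hbs]
                  rfl
                have hpb : preBodyOf r = some ((spanmap (stuff, rest)).2.1, rest) := by
                  rw [preBodyOf_eq, hbsp]
                  rfl
                rw [hbsp]
                have hokB : okBody (spanmap (stuff, rest)).2.1 = true := by
                  rw [← classOk_some r _ rest hpb]
                  exact okAll_head _ hok
                have hokR : rest.tails.all classOk = true :=
                  okAll_suffix rest ('[' :: r)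
                    ((preBodyOf_suffix r _ rest hpb).trans (List.suffix_cons '[' r)) hok
                have hsne : stuff ≠ [] := bracketSpan_stuff_ne_nil r stuff rest hbs
                have hrec := ihn rest.length
                  (by have := bracketSpan_shrink _ _ _ hbs; simp; omega) rest rfl hokR
                refine List.Forall₂.cons ?_ hrec
                simp only [] at hokB ⊢
                by_cases hx : stuff.headD ' ' = '!'
                · have hsp : spanmap (stuff, rest) = (true, stuff.drop 1, rest) := by
                    unfold spanmap
                    rw [if_pos hx, decide_eq_true hx]
                  have hstuff : stuff = (if true then ['!'] else []) ++ stuff.drop 1 := by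
                    rcases stuff with _ | ⟨a, t⟩
                    · exact absurd rfl hsne
                    · simp only [List.headD_cons] at hx
                      simp [hx]
                  rw [hsp] at hokB
                  rw [if_pos hx, decide_eq_true hx]
                  conv_lhs => rw [hstuff]
                  exact class_rel (stuff.drop 1) true (by rw [← hstuff]; exact hsne)
                    (by intro h; cases h) hokB
                · have hsp : spanmap (stuff, rest) = (false, stuff, rest) := by
                    unfold spanmap
                    rw [if_neg hx, decide_eq_false hx]
                  have hstuff : stuff = (if false then ['!'] else []) ++ stuff := by simp
                  rw [hsp] at hokB
                  rw [if_neg hx, decide_eq_false hx]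
                  conv_lhs => rw [hstuff]
                  exact class_rel stuff false (by rw [← hstuff]; exact hsne)
                    (fun _ => hx) hokB
          · have hok' : r.tails.all classOk = true := okAll_tail c r hok
            have hrec := ihn r.length (by simp) r rfl hok'
            by_cases h1 : c = '*'
            · subst h1
              rw [show tokSpecA ('*' :: r) = GlobTok.star :: tokSpecA r from by rw [tokSpecA],
                  btokenize.eq_2]
              exact List.Forall₂.cons (Or.inl ⟨rfl, rfl⟩) hrec
            · by_cases h2 : c = '?'
              · subst h2
                rw [show tokSpecA ('?' :: r) = GlobTok.any :: tokSpecA r from by rw [tokSpecA],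
                    btokenize.eq_3]
                exact List.Forall₂.cons TRel_any hrec
              · rw [tokSpecA.eq_5 c r (fun h => h1 h) (fun h => h2 h) (fun h => h3 h),
                    btokenize.eq_5 c r (fun h => h1 h) (fun h => h2 h) (fun h => h3 h)]
                exact List.Forall₂.cons (TRel_lit c) hrec

-- ---------- Part 7: assembly ----------

theorem matchone (p v : String) (hok : p.toList.tails.all classOk = true) :
    fnmatchcaseL v p = bmatch (btokenize p.toList) v.toList := by
  unfold fnmatchcaseL
  rw [fnTokenize_rmatch, rmatch_rel v.toList _ _ (tok_rel p.toList hok), bmatch_eq_brmatch]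

theorem if_then_true (X : Prop) [Decidable X] (y : Bool) :
    (if X then true else y) = (decide X || y) := by
  by_cases h : X <;> simp [h]

theorem loopA_eq : ∀ (ps : List String) (v : String) (cs : Bool),
    ((if cs then ps else ps.map PySem.Str.lower).all (fun p => p.toList.tails.all classOk)) = true →
    loopA ps v cs
      = (if cs then ps else ps.map PySem.Str.lower).any
          (fun p => bmatch (btokenize p.toList) (if cs then v else PySem.Str.lower v).toList) := by
  intro ps v cs
  induction ps with
  | nil => intro _; cases cs <;> simp [loopA]
  | cons p ps ih =>
      intro hall
      cases cs with
      | true =>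
          simp only [reduceIte] at hall ih ⊢
          simp only [List.all_cons, Bool.and_eq_true] at hall
          rw [show loopA (p :: ps) v true
                = (if fnmatchcaseL v p then true else loopA ps v true) from by
              rw [loopA]
              simp]
          rw [if_then_true, matchone p v hall.1, ih hall.2, List.any_cons]
          simp
      | false =>
          simp only [Bool.false_eq_true, reduceIte] at hall ih ⊢
          simp only [List.map_cons, List.all_cons, Bool.and_eq_true] at hall
          rw [show loopA (p :: ps) v false
                = (if fnmatchcaseL (PySem.Str.lower v) (PySem.Str.lower p) then true
                   else loopA ps v false) from by
              rw [loopA]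
              simp]
          rw [if_then_true, matchone (PySem.Str.lower p) (PySem.Str.lower v) hall.1,
              ih hall.2, List.map_cons, List.any_cons]
          simp

-- ===== VERDICT (by name: the statement is the Claim_ definition above) =====
theorem match_allowlist_spec : Claim_equal_match_allowlist := by
  intro patterns value cs _ hpre
  unfold Spec_match_allowlist match_allowlist match_allowlist_alt
  unfold Pre_match_allowlist at hpre
  by_cases hp : patterns = []
  · subst hp
    cases cs <;> simp
  · rw [if_neg hp, loopA_eq patterns value cs hpre]
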